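-- pv_equiv track=rewrite | github.com/kejriwalrahul/Regular-Expression-Matching | cyk.py | validCYK
-- ===== SOURCE A (Python) =====
-- def validCYK(regex):
-- 	length = len(regex)
--
-- 	# Adding basic productions
-- 	unitProd = [('L','('),
-- 				('R',')'),
-- 				('P','+'),
-- 				('A','*'),
-- 				('D','.')]
--
-- 	prod = [('S','LM'),
-- 			('M','SN'),
-- 			('N','PO'),
-- 			('O','SR'),
-- 			('S','LF'),
-- 			('F','SG'),
-- 			('G','AR'),
-- 			('S','LH'),
-- 			('H','SI'),
-- 			('I','DO')]
--
-- 	# Adding all letters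
-- 	# Productions of form S -> a | b | c | ... | z
-- 	ch = "a"
-- 	for i in range(0,26):
-- 		unitProd.append(('S',ch))
-- 		ch = chr(ord(ch) + 1)
--
-- 	arr = [[[] for j in range(length)] for i in range(length)]
--
-- 	for i in range(length):
-- 		for production in unitProd:
-- 			if regex[i] == production[1]:
-- 				arr[i][i].append(production[0])
-- 				break
--
-- 	for k in range(1,length):
-- 		for i in range(k,length):
-- 			# at index (i,i-k)
-- 			for j in range(i-k+1,i+1):
-- 				for l,r in prod:
-- 					if r[0] in arr[j-1][i-k] and r[1] in arr[i][j]: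
-- 						arr[i][i-k].append(l)
--
-- 	if 'S' in arr[length-1][0]:
-- 		return 1
-- 	return 0
-- ===== SOURCE B (Python) =====
-- def validCYK(regex):
--     # Table-driven predictive (LL(1)) pushdown check, one left-to-right pass.
--     stack = ["E"]
--     for c in regex:
--         if not stack:
--             return 0
--         top = stack.pop()
--         if top == "E":
--             if 'a' <= c <= 'z':
--                 continue
--             if c == '(':
--                 stack.append(")")
--                 stack.append("T")
--                 stack.append("E")
--                 continue
--             return 0
--         if top == "T":
--             if c == '+' or c == '.':
--                 stack.append("E")
--                 continue
--             if c == '*':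
--                 continue
--             return 0
--         # top == ")"
--         if c == ')':
--             continue
--         return 0
--     return 1 if not stack else 0
-- ===== Notes on version B (the rewrite author's own statement) =====
-- stated objective: faster
-- what changed: Replaced the O(n^3) CYK dynamic-programming table for the fixed fully-parenthesized regex grammar by a single left-to-right pass with an explicit LL(1) prediction stack.
import Mathlib
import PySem

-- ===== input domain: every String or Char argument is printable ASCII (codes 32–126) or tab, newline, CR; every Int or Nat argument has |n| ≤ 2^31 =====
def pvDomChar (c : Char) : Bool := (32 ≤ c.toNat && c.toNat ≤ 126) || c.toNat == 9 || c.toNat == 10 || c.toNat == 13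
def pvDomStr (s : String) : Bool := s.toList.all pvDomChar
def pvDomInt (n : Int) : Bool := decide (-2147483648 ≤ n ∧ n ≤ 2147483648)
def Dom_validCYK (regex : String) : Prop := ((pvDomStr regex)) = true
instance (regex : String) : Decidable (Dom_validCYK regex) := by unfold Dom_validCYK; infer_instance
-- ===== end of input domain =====

-- B replaces the O(n^3) CYK table of A by a single O(n) left-to-right pass with an
-- explicit LL(1) prediction stack for the same fixed fully-parenthesized grammar (objective: faster).

-- ===== PORT A =====
-- unitProd before the letter loop
def pvUnitBase : List (Char × Char) := [('L','('),('R',')'),('P','+'),('A','*'),('D','.')]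
-- prod; a right-hand side "LM" is ported as the pair of its two characters
def pvProd : List (Char × Char × Char) :=
  [('S',('L','M')), ('M',('S','N')), ('N',('P','O')), ('O',('S','R')),
   ('S',('L','F')), ('F',('S','G')), ('G',('A','R')),
   ('S',('L','H')), ('H',('S','I')), ('I',('D','O'))]
-- the letter loop: for i in range(0,26): unitProd.append(('S',ch)); ch = chr(ord(ch)+1)
-- chr(ord(ch)+1) is ported as Char.ofNat (·.toNat + 1): exact here, all codes stay below 0xD800
def pvUnitProd : List (Char × Char) :=
  ((PySem.List.pyRange 0 26 1).foldl
    (fun st _ => (st.1 ++ [('S', st.2)], Char.ofNat (st.2.toNat + 1))) (pvUnitBase, 'a')).1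
-- the 'for production in unitProd: if regex[i] == production[1]: …; break' loop
def pvUnitScan : List (Char × Char) → Char → Option Char
  | [], _ => none
  | p :: rest, c => if c = p.2 then some p.1 else pvUnitScan rest c
-- arr[i][j] of the 2D list (all indices used by the loops are non-negative and in range)
def pvGet (arr : List (List (List Char))) (i j : Int) : List Char :=
  (arr.getD i.toNat []).getD j.toNat []
-- arr[i][j].append(X)
def pvAppend (arr : List (List (List Char))) (i j : Int) (X : Char) :
    List (List (List Char)) :=
  arr.modify i.toNat (fun row => row.modify j.toNat (fun cell => cell ++ [X]))
-- body of 'for l,r in prod: if r[0] in arr[j-1][i-k] and r[1] in arr[i][j]: arr[i][i-k].append(l)'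
def pvProdStep (k i j : Int) (arr : List (List (List Char))) (p : Char × Char × Char) :
    List (List (List Char)) :=
  if p.2.1 ∈ pvGet arr (j-1) (i-k) ∧ p.2.2 ∈ pvGet arr i j then pvAppend arr i (i-k) p.1 else arr
-- 'for j in range(i-k+1,i+1): …'
def pvJLoop (k i : Int) (arr : List (List (List Char))) : List (List (List Char)) :=
  (PySem.List.pyRange (i-k+1) (i+1) 1).foldl (fun arr j => pvProd.foldl (pvProdStep k i j) arr) arr
-- 'for i in range(k,length): …'  then  'for k in range(1,length): …'
def pvKStep (length : Int) (arr : List (List (List Char))) (k : Int) :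
    List (List (List Char)) :=
  (PySem.List.pyRange k length 1).foldl (fun arr i => pvJLoop k i arr) arr

def validCYK (regex : String) : Int :=
  let cs := regex.toList
  let length : Int := (cs.length : Int)
  -- arr = [[[] for j in range(length)] for i in range(length)]
  let arr0 := (PySem.List.pyRange 0 length 1).map
    (fun _ => (PySem.List.pyRange 0 length 1).map (fun _ => ([] : List Char)))
  -- first loop: unit productions on the diagonal; regex[i] with i in range(length) is always in range
  let arr1 := (PySem.List.pyRange 0 length 1).foldl
    (fun arr i =>
      match pvUnitScan pvUnitProd ((PySem.List.pyGet? cs i).getD ' ') with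
      | some X => pvAppend arr i i X
      | none => arr)
    arr0
  let arr2 := (PySem.List.pyRange 1 length 1).foldl (pvKStep length) arr1
  if 'S' ∈ pvGet arr2 (length - 1) 0 then 1 else 0

-- ===== PORT B =====
-- prediction-stack symbols: "E" expression, "T" tail (operator part), ")" closing paren
inductive PSym : Type
  | E | T | C
deriving DecidableEq, Repr

-- one character against the top of the stack (Source B's loop body)
def pvStep (st : List PSym) (c : Char) : Option (List PSym) :=
  match st with
  | PSym.E :: rest =>
      if 'a' ≤ c ∧ c ≤ 'z' then some rest
      else if c = '(' then some (PSym.E :: PSym.T :: PSym.C :: rest)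
      else none
  | PSym.T :: rest =>
      if c = '+' ∨ c = '.' then some (PSym.E :: rest)
      else if c = '*' then some rest
      else none
  | PSym.C :: rest => if c = ')' then some rest else none
  | [] => none

-- the 'for c in regex' loop; an early 'return 0' is the none state
def pvRun : List Char → List PSym → Option (List PSym)
  | [], st => some st
  | c :: w, st =>
      match pvStep st c with
      | some st' => pvRun w st'
      | none => none

def validCYK_alt (regex : String) : Int :=
  match pvRun regex.toList [PSym.E] with
  | some [] => 1
  | _ => 0

-- ===== PRECONDITION & SPEC =====
-- On the empty string A evaluates arr[length-1] = arr[-1] on the empty table and raises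
-- IndexError (B would return 0 there); Pre_ excludes exactly that input.
def Pre_validCYK (regex : String) : Prop := regex ≠ ""
instance (regex : String) : Decidable (Pre_validCYK regex) := by unfold Pre_validCYK; infer_instance
def pvWitness_validCYK : String := "(a+b)"

def Spec_validCYK (regex : String) (out : Int) : Prop := out = validCYK_alt regex
instance (regex : String) (out : Int) : Decidable (Spec_validCYK regex out) := by
  unfold Spec_validCYK; infer_instance

-- ===== CLAIM (what is proved, stated in full; the proofs are below) =====
def Claim_equal_validCYK : Prop :=
  ∀ (regex : String), Dom_validCYK regex → Pre_validCYK regex → Spec_validCYK regex (validCYK regex)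

-- ===== LEMMAS AND PROOFS =====

-- function-table model of A's 2D list, used only by the proofs below
def pvUpdF (arr : Int → Int → List Char) (i j : Int) (X : Char) : Int → Int → List Char :=
  fun a b => if a = i ∧ b = j then arr a b ++ [X] else arr a b
def pvProdStepF (k i j : Int) (arr : Int → Int → List Char) (p : Char × Char × Char) :
    Int → Int → List Char :=
  if p.2.1 ∈ arr (j-1) (i-k) ∧ p.2.2 ∈ arr i j then pvUpdF arr i (i-k) p.1 else arr
def pvJLoopF (k i : Int) (arr : Int → Int → List Char) : Int → Int → List Char :=
  (PySem.List.pyRange (i-k+1) (i+1) 1).foldl (fun arr j => pvProd.foldl (pvProdStepF k i j) arr) arr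
def pvKStepF (length : Int) (arr : Int → Int → List Char) (k : Int) : Int → Int → List Char :=
  (PySem.List.pyRange k length 1).foldl (fun arr i => pvJLoopF k i arr) arr
-- function-table model of the whole computation
def pvArr1F (cs : List Char) : Int → Int → List Char :=
  (PySem.List.pyRange 0 (cs.length : Int) 1).foldl
    (fun arr i =>
      match pvUnitScan pvUnitProd ((PySem.List.pyGet? cs i).getD ' ') with
      | some X => pvUpdF arr i i X
      | none => arr)
    (fun _ _ => [])
def pvTableF (cs : List Char) : Int → Int → List Char :=
  (PySem.List.pyRange 1 (cs.length : Int) 1).foldl (pvKStepF (cs.length : Int)) (pvArr1F cs)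


-- The grammar derivation relation generated by A's production lists.
inductive PvDer : Char → List Char → Prop
  | unit {X c} : (X, c) ∈ pvUnitProd → PvDer X [c]
  | bin {X Y Z s t} : (X, Y, Z) ∈ pvProd → PvDer Y s → PvDer Z t → PvDer X (s ++ t)

theorem pvUnitProd_eq :
    pvUnitProd = pvUnitBase ++ (List.range 26).map (fun m => ('S', Char.ofNat (97 + m))) := by
  decide

theorem pvDer_ne_nil {X : Char} {u : List Char} (h : PvDer X u) : u ≠ [] := by
  induction h with
  | unit _ => simp
  | bin _ _ _ ih1 ih2 => simp_all

theorem mem_unitProd_letter {c : Char} (h1 : 'a' ≤ c) (h2 : c ≤ 'z') :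
    ('S', c) ∈ pvUnitProd := by
  have hb : 97 ≤ c.toNat ∧ c.toNat ≤ 122 := by
    constructor <;> simp [Char.le_def, UInt32.le_iff_toNat_le] at h1 h2 <;> omega
  rw [pvUnitProd_eq]
  refine List.mem_append_right _ ?_
  refine List.mem_map.mpr ⟨c.toNat - 97, List.mem_range.mpr (by omega), ?_⟩
  rw [Nat.add_sub_cancel' hb.1, Char.ofNat_toNat]

-- ===== structural characterization of derivations =====
def PvShape : Char → List Char → Prop
  | 'L', u => u = ['(']
  | 'R', u => u = [')']
  | 'P', u => u = ['+']
  | 'A', u => u = ['*']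
  | 'D', u => u = ['.']
  | 'S', u => (∃ c, u = [c] ∧ 'a' ≤ c ∧ c ≤ 'z') ∨
      (∃ s t, PvDer 'S' s ∧ PvDer 'S' t ∧
        (u = '(' :: (s ++ '+' :: (t ++ [')'])) ∨ u = '(' :: (s ++ '.' :: (t ++ [')'])))) ∨
      (∃ s, PvDer 'S' s ∧ u = '(' :: (s ++ ['*', ')']))
  | 'M', u => ∃ s t, PvDer 'S' s ∧ PvDer 'S' t ∧ u = s ++ '+' :: (t ++ [')'])
  | 'N', u => ∃ t, PvDer 'S' t ∧ u = '+' :: (t ++ [')'])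
  | 'O', u => ∃ t, PvDer 'S' t ∧ u = t ++ [')']
  | 'F', u => ∃ s, PvDer 'S' s ∧ u = s ++ ['*', ')']
  | 'G', u => u = ['*', ')']
  | 'H', u => ∃ s t, PvDer 'S' s ∧ PvDer 'S' t ∧ u = s ++ '.' :: (t ++ [')'])
  | 'I', u => ∃ t, PvDer 'S' t ∧ u = '.' :: (t ++ [')'])
  | _, _ => False

theorem pvDer_shape {X : Char} {u : List Char} (h : PvDer X u) : PvShape X u := by
  induction h with
  | @unit X c hm =>
      rw [pvUnitProd_eq] at hm
      rcases List.mem_append.mp hm with hb | hl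
      · simp only [pvUnitBase, List.mem_cons, List.not_mem_nil, or_false] at hb
        rcases hb with h | h | h | h | h <;>
          (obtain ⟨rfl, rfl⟩ := Prod.mk.injEq .. ▸ h; simp [PvShape])
      · obtain ⟨m, hm26, hpair⟩ := List.mem_map.mp hl
        obtain ⟨h1, h2⟩ := Prod.mk.injEq .. ▸ hpair
        subst h1
        simp only [PvShape]
        simp only [List.mem_range] at hm26
        subst h2
        have hv : Nat.isValidChar (97+m) := Or.inl (by omega)
        have ht : (Char.ofNat (97+m)).val.toNat = 97+m := by
          simp [Char.ofNat, hv, Char.ofNatAux]; omega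
        have ha : ('a').val.toNat = 97 := rfl
        have hz : ('z').val.toNat = 122 := rfl
        refine Or.inl ⟨Char.ofNat (97+m), rfl, ?_, ?_⟩ <;>
          rw [Char.le_def, UInt32.le_iff_toNat_le] <;> omega
  | @bin X Y Z s t hm hY hZ ihY ihZ =>
      simp only [pvProd, List.mem_cons, List.not_mem_nil, or_false] at hm
      rcases hm with h|h|h|h|h|h|h|h|h|h <;> obtain ⟨rfl, rfl, rfl⟩ := by
        simpa using h
      all_goals simp only [PvShape] at ihY ihZ ⊢
      · -- S -> L M
        subst ihY
        obtain ⟨s', t', hs', ht', rfl⟩ := ihZ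
        exact Or.inr (Or.inl ⟨s', t', hs', ht', Or.inl rfl⟩)
      · -- M -> S N
        obtain ⟨t', ht', rfl⟩ := ihZ
        exact ⟨s, t', hY, ht', rfl⟩
      · -- N -> P O
        subst ihY
        obtain ⟨t', ht', rfl⟩ := ihZ
        exact ⟨t', ht', rfl⟩
      · -- O -> S R
        subst ihZ
        exact ⟨s, hY, rfl⟩
      · -- S -> L F
        subst ihY
        obtain ⟨s', hs', rfl⟩ := ihZ
        exact Or.inr (Or.inr ⟨s', hs', rfl⟩)
      · -- F -> S G
        subst ihZ
        exact ⟨s, hY, rfl⟩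
      · -- G -> A R
        subst ihY; subst ihZ; rfl
      · -- S -> L H
        subst ihY
        obtain ⟨s', t', hs', ht', rfl⟩ := ihZ
        exact Or.inr (Or.inl ⟨s', t', hs', ht', Or.inr rfl⟩)
      · -- H -> S I
        obtain ⟨t', ht', rfl⟩ := ihZ
        exact ⟨s, t', hY, ht', rfl⟩
      · -- I -> D O
        subst ihY
        obtain ⟨t', ht', rfl⟩ := ihZ
        exact ⟨t', ht', rfl⟩

theorem pvDer_singleton' {X c : Char} {u : List Char} (h : PvDer X u) (hu : u = [c]) :
    (X, c) ∈ pvUnitProd := by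
  cases h with
  | unit hm => rw [List.cons.injEq] at hu; rw [← hu.1]; exact hm
  | @bin _ Y Z s t hm hY hZ =>
      exfalso
      have h1 := pvDer_ne_nil hY
      have h2 := pvDer_ne_nil hZ
      have := congrArg List.length hu
      rcases s with _ | ⟨_, _⟩ <;> rcases t with _ | ⟨_, _⟩ <;> simp_all

theorem pvDer_singleton {X c : Char} (h : PvDer X [c]) : (X, c) ∈ pvUnitProd :=
  pvDer_singleton' h rfl

theorem pvDer_bin_inv {X : Char} {u : List Char} (h : PvDer X u) (hl : 2 ≤ u.length) :
    ∃ Y Z s t, (X, Y, Z) ∈ pvProd ∧ PvDer Y s ∧ PvDer Z t ∧ u = s ++ t ∧ s ≠ [] ∧ t ≠ [] := by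
  cases h with
  | unit hm => simp at hl
  | @bin _ Y Z s t hm hY hZ =>
      exact ⟨Y, Z, s, t, hm, hY, hZ, rfl, pvDer_ne_nil hY, pvDer_ne_nil hZ⟩

-- derivation constructors for the three bracketed forms
theorem pvDer_plus {s t : List Char} (hs : PvDer 'S' s) (ht : PvDer 'S' t) :
    PvDer 'S' ('(' :: (s ++ '+' :: (t ++ [')']))) := by
  have hL : PvDer 'L' ['('] := PvDer.unit (by decide)
  have hP : PvDer 'P' ['+'] := PvDer.unit (by decide)
  have hR : PvDer 'R' [')'] := PvDer.unit (by decide)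
  have hO : PvDer 'O' (t ++ [')']) := PvDer.bin (by decide) ht hR
  have hN : PvDer 'N' ('+' :: (t ++ [')'])) := PvDer.bin (by decide) hP hO
  have hM : PvDer 'M' (s ++ '+' :: (t ++ [')'])) := PvDer.bin (by decide) hs hN
  exact PvDer.bin (by decide) hL hM

theorem pvDer_dot {s t : List Char} (hs : PvDer 'S' s) (ht : PvDer 'S' t) :
    PvDer 'S' ('(' :: (s ++ '.' :: (t ++ [')']))) := by
  have hL : PvDer 'L' ['('] := PvDer.unit (by decide)
  have hD : PvDer 'D' ['.'] := PvDer.unit (by decide)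
  have hR : PvDer 'R' [')'] := PvDer.unit (by decide)
  have hO : PvDer 'O' (t ++ [')']) := PvDer.bin (by decide) ht hR
  have hI : PvDer 'I' ('.' :: (t ++ [')'])) := PvDer.bin (by decide) hD hO
  have hH : PvDer 'H' (s ++ '.' :: (t ++ [')'])) := PvDer.bin (by decide) hs hI
  exact PvDer.bin (by decide) hL hH

theorem pvDer_star {s : List Char} (hs : PvDer 'S' s) :
    PvDer 'S' ('(' :: (s ++ ['*', ')'])) := by
  have hL : PvDer 'L' ['('] := PvDer.unit (by decide)
  have hA : PvDer 'A' ['*'] := PvDer.unit (by decide)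
  have hR : PvDer 'R' [')'] := PvDer.unit (by decide)
  have hG : PvDer 'G' ['*', ')'] := PvDer.bin (by decide) hA hR
  have hF : PvDer 'F' (s ++ ['*', ')']) := PvDer.bin (by decide) hs hG
  exact PvDer.bin (by decide) hL hF

-- ===== parser (port B) correctness =====
theorem pvStep_E_lower {c : Char} (h1 : 'a' ≤ c) (h2 : c ≤ 'z') (st : List PSym) :
    pvStep (PSym.E :: st) c = some st := by
  simp [pvStep, h1, h2]

theorem pvRun_complete_aux (N : Nat) :
    ∀ (s : List Char), s.length ≤ N → PvDer 'S' s →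
      ∀ (w : List Char) (st : List PSym), pvRun (s ++ w) (PSym.E :: st) = pvRun w st := by
  induction N with
  | zero => intro s hs h; exact absurd (List.length_eq_zero_iff.mp (Nat.le_zero.mp hs)) (pvDer_ne_nil h)
  | succ N ih =>
      intro s hs h w st
      rcases pvDer_shape h with ⟨c, rfl, h1, h2⟩ | ⟨s1, t, hs1, ht, rfl | rfl⟩ | ⟨s1, hs1, rfl⟩
      · simp only [List.cons_append, List.nil_append, pvRun, pvStep_E_lower h1 h2]
      · have l1 : s1.length ≤ N := by simp at hs; omega
        have l2 : t.length ≤ N := by simp at hs; omega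
        simp only [List.cons_append, List.append_assoc, List.nil_append]
        rw [show pvRun ('(' :: (s1 ++ ('+' :: (t ++ ')' :: w)))) (PSym.E :: st)
              = pvRun (s1 ++ ('+' :: (t ++ ')' :: w))) (PSym.E :: PSym.T :: PSym.C :: st) from rfl]
        rw [ih s1 l1 hs1]
        rw [show pvRun ('+' :: (t ++ ')' :: w)) (PSym.T :: PSym.C :: st)
              = pvRun (t ++ ')' :: w) (PSym.E :: PSym.C :: st) from rfl]
        rw [ih t l2 ht]
        rfl
      · have l1 : s1.length ≤ N := by simp at hs; omega
        have l2 : t.length ≤ N := by simp at hs; omega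
        simp only [List.cons_append, List.append_assoc, List.nil_append]
        rw [show pvRun ('(' :: (s1 ++ ('.' :: (t ++ ')' :: w)))) (PSym.E :: st)
              = pvRun (s1 ++ ('.' :: (t ++ ')' :: w))) (PSym.E :: PSym.T :: PSym.C :: st) from rfl]
        rw [ih s1 l1 hs1]
        rw [show pvRun ('.' :: (t ++ ')' :: w)) (PSym.T :: PSym.C :: st)
              = pvRun (t ++ ')' :: w) (PSym.E :: PSym.C :: st) from rfl]
        rw [ih t l2 ht]
        rfl
      · have l1 : s1.length ≤ N := by simp at hs; omega
        simp only [List.cons_append, List.append_assoc, List.nil_append]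
        rw [show pvRun ('(' :: (s1 ++ ('*' :: (')' :: w)))) (PSym.E :: st)
              = pvRun (s1 ++ ('*' :: (')' :: w))) (PSym.E :: PSym.T :: PSym.C :: st) from rfl]
        rw [ih s1 l1 hs1]
        rfl

theorem pvRun_complete {s : List Char} (h : PvDer 'S' s) :
    ∀ (w : List Char) (st : List PSym), pvRun (s ++ w) (PSym.E :: st) = pvRun w st :=
  pvRun_complete_aux s.length s le_rfl h

theorem pvRun_sound_aux (N : Nat) :
    ∀ (w : List Char), w.length ≤ N → ∀ (st : List PSym), pvRun w (PSym.E :: st) = some [] →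
      ∃ s w', w = s ++ w' ∧ PvDer 'S' s ∧ pvRun w' st = some [] := by
  induction N with
  | zero =>
      intro w hw st h
      rw [List.length_eq_zero_iff.mp (Nat.le_zero.mp hw)] at h
      simp [pvRun] at h
  | succ N ih =>
      intro w hw st h
      rcases w with _ | ⟨c, w'⟩
      · simp [pvRun] at h
      by_cases hc : 'a' ≤ c ∧ c ≤ 'z'
      · -- letter
        rw [show pvRun (c :: w') (PSym.E :: st) = pvRun w' st from by
              simp [pvRun, pvStep_E_lower hc.1 hc.2]] at h
        exact ⟨[c], w', rfl, PvDer.unit (mem_unitProd_letter hc.1 hc.2), h⟩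
      by_cases hp : c = '('
      · subst hp
        rw [show pvRun ('(' :: w') (PSym.E :: st)
              = pvRun w' (PSym.E :: PSym.T :: PSym.C :: st) from rfl] at h
        have hw' : w'.length ≤ N := by simp at hw; omega
        obtain ⟨s1, v, rfl, hs1, hv⟩ := ih w' hw' _ h
        rcases v with _ | ⟨d, v2⟩
        · simp [pvRun] at hv
        by_cases hd : d = '+' ∨ d = '.'
        · have hv2 : pvRun v2 (PSym.E :: PSym.C :: st) = some [] := by
            rcases hd with rfl | rfl <;> simpa [pvRun, pvStep] using hv
          have hl2 : v2.length ≤ N := by simp at hw; omega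
          obtain ⟨s2, v3, rfl, hs2, hv3⟩ := ih v2 hl2 _ hv2
          rcases v3 with _ | ⟨e, v4⟩
          · simp [pvRun] at hv3
          by_cases he : e = ')'
          · subst he
            rw [show pvRun (')' :: v4) (PSym.C :: st) = pvRun v4 st from rfl] at hv3
            rcases hd with rfl | rfl
            · exact ⟨'(' :: (s1 ++ '+' :: (s2 ++ [')'])), v4, by simp, pvDer_plus hs1 hs2, hv3⟩
            · exact ⟨'(' :: (s1 ++ '.' :: (s2 ++ [')'])), v4, by simp, pvDer_dot hs1 hs2, hv3⟩
          · rw [show pvRun (e :: v4) (PSym.C :: st) = none from by simp [pvRun, pvStep, he]] at hv3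
            exact absurd hv3 (by simp)
        · by_cases hst : d = '*'
          · subst hst
            rw [show pvRun ('*' :: v2) (PSym.T :: PSym.C :: st)
                  = pvRun v2 (PSym.C :: st) from rfl] at hv
            rcases v2 with _ | ⟨e, v3⟩
            · simp [pvRun] at hv
            by_cases he : e = ')'
            · subst he
              rw [show pvRun (')' :: v3) (PSym.C :: st) = pvRun v3 st from rfl] at hv
              exact ⟨'(' :: (s1 ++ ['*', ')']), v3, by simp, pvDer_star hs1, hv⟩
            · rw [show pvRun (e :: v3) (PSym.C :: st) = none from by
                    simp [pvRun, pvStep, he]] at hv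
              exact absurd hv (by simp)
          · push Not at hd
            rw [show pvRun (d :: v2) (PSym.T :: PSym.C :: st) = none from by
                  simp [pvRun, pvStep, hd.1, hd.2, hst]] at hv
            exact absurd hv (by simp)
      · rw [show pvRun (c :: w') (PSym.E :: st) = none from by
              simp [pvRun, pvStep, hc, hp]] at h
        exact absurd h (by simp)

theorem pvRun_sound :
    ∀ (w : List Char) (st : List PSym), pvRun w (PSym.E :: st) = some [] →
      ∃ s w', w = s ++ w' ∧ PvDer 'S' s ∧ pvRun w' st = some [] :=
  fun w => pvRun_sound_aux w.length w le_rfl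

theorem pvRun_nil_stack :
    ∀ (w : List Char), pvRun w ([] : List PSym) = some [] → w = [] := by
  intro w h
  rcases w with _ | ⟨c, w'⟩
  · rfl
  · simp [pvRun, pvStep] at h

theorem alt_eq_one_iff (regex : String) :
    validCYK_alt regex = 1 ↔ PvDer 'S' regex.toList := by
  unfold validCYK_alt
  constructor
  · intro h
    have hrun : pvRun regex.toList [PSym.E] = some [] := by
      rcases hr : pvRun regex.toList [PSym.E] with _ | st
      · rw [hr] at h; simp at h
      · rcases st with _ | ⟨x, st'⟩
        · rfl
        · rw [hr] at h; simp at h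
    obtain ⟨s, w', heq, hder, hw'⟩ := pvRun_sound regex.toList [] hrun
    have : w' = [] := pvRun_nil_stack w' hw'
    subst this
    rw [heq, List.append_nil]
    exact hder
  · intro h
    have := pvRun_complete h [] []
    rw [List.append_nil] at this
    rw [this]
    rfl

theorem alt_zero_or_one (regex : String) :
    validCYK_alt regex = 0 ∨ validCYK_alt regex = 1 := by
  unfold validCYK_alt
  rcases pvRun regex.toList [PSym.E] with _ | st
  · left; rfl
  · rcases st with _ | _ <;> simp

-- ===== CYK (port A) correctness =====
-- the substring regex[b..a] (both ends inclusive), for 0 ≤ b ≤ a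
def pvSub (cs : List Char) (b a : Int) : List Char := (cs.drop b.toNat).take ((a + 1 - b).toNat)

-- the table invariant after levels 1..K
def PvInv (cs : List Char) (arr : Int → Int → List Char) (K : Int) : Prop :=
  ∀ (a b : Int) (X : Char),
    X ∈ arr a b ↔ (0 ≤ b ∧ b ≤ a ∧ a < (cs.length : Int) ∧ a - b ≤ K ∧ PvDer X (pvSub cs b a))

-- contents of the diagonal cell for index i
def pvDiag (cs : List Char) (i : Int) : List Char :=
  match pvUnitScan pvUnitProd ((PySem.List.pyGet? cs i).getD ' ') with
  | some X => [X]
  | none => []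

-- characters appended to cell (i, i-k) during level k
def pvAdd (arr : Int → Int → List Char) (k i : Int) : List Char :=
  (PySem.List.pyRange (i-k+1) (i+1) 1).flatMap (fun j =>
    pvProd.filterMap (fun p =>
      if p.2.1 ∈ arr (j-1) (i-k) ∧ p.2.2 ∈ arr i j then some p.1 else none))

theorem loop1_body_eq (cs : List Char) :
    (fun (arr : Int → Int → List Char) (i : Int) =>
      match pvUnitScan pvUnitProd ((PySem.List.pyGet? cs i).getD ' ') with
      | some X => pvUpdF arr i i X
      | none => arr)
    = (fun arr i => fun a b => if a = i ∧ b = i then arr a b ++ pvDiag cs i else arr a b) := by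
  funext arr i
  unfold pvDiag
  cases pvUnitScan pvUnitProd ((PySem.List.pyGet? cs i).getD ' ') with
  | none => funext a b; simp
  | some X => rfl

theorem foldl_writers (d : Int → List Char) :
    ∀ (L : List Int), L.Nodup → ∀ (arr : Int → Int → List Char),
      (L.foldl (fun arr i => fun a b => if a = i ∧ b = i then arr a b ++ d i else arr a b) arr)
      = fun a b => if a = b ∧ a ∈ L then arr a b ++ d a else arr a b := by
  intro L
  induction L with
  | nil => intro _ arr; funext a b; simp
  | cons i L ih =>
      intro hnd arr
      rw [List.foldl_cons, ih hnd.of_cons]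
      funext a b
      by_cases hab : a = b
      · subst hab
        by_cases hmem : a ∈ L
        · have hai : a ≠ i := fun h => (List.nodup_cons.mp hnd).1 (h ▸ hmem)
          simp [hmem, hai]
        · by_cases hai : a = i
          · subst hai
            simp [hmem]
          · simp [hmem, hai]
      · have h1 : ¬(a = b ∧ a ∈ L) := fun h => hab h.1
        have h2 : ¬(a = b ∧ a ∈ i :: L) := fun h => hab h.1
        simp only [h1, h2, if_false]
        have h3 : ¬(a = i ∧ b = i) := fun h => hab (h.1.trans h.2.symm)
        simp [h3]

theorem foldl_prodStep (k i j : Int) (hj1 : j - 1 ≠ i) (hj2 : j ≠ i - k) :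
    ∀ (ps : List (Char × Char × Char)) (arr : Int → Int → List Char),
      ps.foldl (pvProdStepF k i j) arr
      = fun a b => if a = i ∧ b = i - k then
          arr a b ++ ps.filterMap (fun p =>
            if p.2.1 ∈ arr (j-1) (i-k) ∧ p.2.2 ∈ arr i j then some p.1 else none)
        else arr a b := by
  intro ps
  induction ps with
  | nil => intro arr; funext a b; simp
  | cons p ps ih =>
      intro arr
      rw [List.foldl_cons]
      by_cases hc : p.2.1 ∈ arr (j-1) (i-k) ∧ p.2.2 ∈ arr i j
      · have hstep : pvProdStepF k i j arr p = pvUpdF arr i (i-k) p.1 := by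
          unfold pvProdStepF; rw [if_pos hc]
        rw [hstep, ih]
        have hr1 : pvUpdF arr i (i-k) p.1 (j-1) (i-k) = arr (j-1) (i-k) := by
          unfold pvUpdF; rw [if_neg (fun h => hj1 h.1)]
        have hr2 : pvUpdF arr i (i-k) p.1 i j = arr i j := by
          unfold pvUpdF; rw [if_neg (fun h => hj2 h.2)]
        funext a b
        rw [hr1, hr2]
        by_cases hab : a = i ∧ b = i - k
        · obtain ⟨rfl, rfl⟩ := hab
          rw [List.filterMap_cons]
          simp only [hc, and_self, if_pos]
          unfold pvUpdF
          simp
        · simp only [if_neg hab]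
          unfold pvUpdF
          rw [if_neg hab]
      · have hstep : pvProdStepF k i j arr p = arr := by
          unfold pvProdStepF; rw [if_neg hc]
        rw [hstep, ih]
        funext a b
        rw [List.filterMap_cons]
        simp only [hc, if_false]

theorem jfold (k i : Int) :
    ∀ (J : List Int), (∀ j ∈ J, i - k + 1 ≤ j ∧ j < i + 1) → ∀ arr,
      J.foldl (fun arr j => pvProd.foldl (pvProdStepF k i j) arr) arr
      = fun a b => if a = i ∧ b = i - k then
          arr a b ++ J.flatMap (fun j => pvProd.filterMap (fun p =>
            if p.2.1 ∈ arr (j-1) (i-k) ∧ p.2.2 ∈ arr i j then some p.1 else none))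
        else arr a b := by
  intro J
  induction J with
  | nil => intro _ arr; funext a b; simp
  | cons j J ih =>
      intro hb arr
      obtain ⟨hj1, hj2⟩ := hb j (List.mem_cons_self ..)
      have hne1 : j - 1 ≠ i := by omega
      have hne2 : j ≠ i - k := by omega
      rw [List.foldl_cons, foldl_prodStep k i j hne1 hne2]
      have hbJ : ∀ x ∈ J, i - k + 1 ≤ x ∧ x < i + 1 := fun x hx => hb x (List.mem_cons_of_mem _ hx)
      rw [ih hbJ]
      have hflat : ∀ (L : List Char),
          J.flatMap (fun j' => pvProd.filterMap (fun p =>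
            if (p.2.1 ∈ if j' - 1 = i ∧ True then arr (j'-1) (i-k) ++ L else arr (j'-1) (i-k))
              ∧ (p.2.2 ∈ if True ∧ j' = i - k then arr i j' ++ L else arr i j')
            then some p.1 else none))
          = J.flatMap (fun j' => pvProd.filterMap (fun p =>
            if p.2.1 ∈ arr (j'-1) (i-k) ∧ p.2.2 ∈ arr i j' then some p.1 else none)) := by
        intro L
        rw [List.flatMap_def, List.flatMap_def]
        congr 1
        apply List.map_congr_left
        intro j' hj'
        obtain ⟨h1, h2⟩ := hbJ j' hj'
        have e1 : (if (j' : Int) - 1 = i ∧ True then arr (j'-1) (i-k) ++ L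
            else arr (j'-1) (i-k)) = arr (j'-1) (i-k) := by
          rw [if_neg (fun h => by have := h.1; omega)]
        have e2 : (if True ∧ (j' : Int) = i - k then arr i j' ++ L else arr i j') = arr i j' := by
          rw [if_neg (fun h => by have := h.2; omega)]
        rw [e1, e2]
      funext a b
      simp only
      by_cases hab : a = i ∧ b = i - k
      · obtain ⟨h1, h2⟩ := hab
        subst h1; subst h2
        rw [if_pos ⟨rfl, rfl⟩, if_pos ⟨rfl, rfl⟩, if_pos ⟨rfl, rfl⟩, hflat,
          List.flatMap_cons, ← List.append_assoc]
      · rw [if_neg hab, if_neg hab, if_neg hab]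

theorem pvJLoop_eq (k i : Int) (arr : Int → Int → List Char) :
    pvJLoopF k i arr
    = fun a b => if a = i ∧ b = i - k then arr a b ++ pvAdd arr k i else arr a b := by
  unfold pvJLoopF pvAdd
  exact jfold k i (PySem.List.pyRange (i-k+1) (i+1) 1)
    (fun j hj => (PySem.List.mem_pyRange_one).mp hj) arr

-- the additions of level k only read cells whose gap a-b is not k
theorem pvAdd_congr (k i : Int) (arr arr' : Int → Int → List Char)
    (h : ∀ a b, a - b ≠ k → arr' a b = arr a b) : pvAdd arr' k i = pvAdd arr k i := by
  unfold pvAdd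
  rw [List.flatMap_def, List.flatMap_def]
  congr 1
  apply List.map_congr_left
  intro j hj
  obtain ⟨h1, h2⟩ := (PySem.List.mem_pyRange_one).mp hj
  rw [h (j-1) (i-k) (by omega), h i j (by omega)]

theorem ifold (k : Int) :
    ∀ (I : List Int), I.Nodup → ∀ (arr : Int → Int → List Char),
      I.foldl (fun arr i => pvJLoopF k i arr) arr
      = fun a b => if b = a - k ∧ a ∈ I then arr a b ++ pvAdd arr k a else arr a b := by
  intro I
  induction I with
  | nil => intro _ arr; funext a b; simp
  | cons i I ih =>
      intro hnd arr
      rw [List.foldl_cons, pvJLoop_eq, ih hnd.of_cons]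
      have hsame : ∀ a, pvAdd (fun a b => if a = i ∧ b = i - k then arr a b ++ pvAdd arr k i
          else arr a b) k a = pvAdd arr k a := by
        intro a
        apply pvAdd_congr
        intro x y hxy
        rw [if_neg (fun h => by omega)]
      funext a b
      simp only [hsame]
      by_cases hik : a = i ∧ b = i - k
      · obtain ⟨rfl, rfl⟩ := hik
        have hnotI : ¬(a - k = a - k ∧ a ∈ I) := fun h => (List.nodup_cons.mp hnd).1 h.2
        rw [if_neg hnotI, if_pos ⟨rfl, rfl⟩, if_pos ⟨rfl, List.mem_cons_self ..⟩]
      · have hinner : (if a = i ∧ b = i - k then arr a b ++ pvAdd arr k i else arr a b)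
            = arr a b := if_neg hik
        rw [hinner]
        by_cases hmem : b = a - k ∧ a ∈ I
        · rw [if_pos hmem, if_pos ⟨hmem.1, List.mem_cons_of_mem _ hmem.2⟩]
        · rw [if_neg hmem, if_neg (fun h => by
            rcases List.mem_cons.mp h.2 with h' | h'
            · exact hik ⟨h', by omega⟩
            · exact hmem ⟨h.1, h'⟩)]

-- ===== substring lemmas =====
theorem pvSub_length (cs : List Char) {b a : Int} (hb : 0 ≤ b) (hba : b ≤ a)
    (han : a < (cs.length : Int)) : ((pvSub cs b a).length : Int) = a + 1 - b := by
  unfold pvSub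
  simp only [List.length_take, List.length_drop]
  omega

theorem pvSub_append (cs : List Char) {b j a : Int} (hb : 0 ≤ b) (hbj : b ≤ j)
    (hja : j ≤ a + 1) : pvSub cs b (j-1) ++ pvSub cs j a = pvSub cs b a := by
  unfold pvSub
  have h1 : ((a + 1 - b)).toNat = (j - 1 + 1 - b).toNat + (a + 1 - j).toNat := by omega
  rw [h1, List.take_add, List.drop_drop]
  have h2 : b.toNat + (j - 1 + 1 - b).toNat = j.toNat := by omega
  rw [h2]

theorem pvSub_singleton (cs : List Char) {a : Int} (h0 : 0 ≤ a) (h1 : a < (cs.length : Int)) :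
    pvSub cs a a = [cs[a.toNat]'(by omega)] := by
  unfold pvSub
  have h2 : a.toNat < cs.length := by omega
  rw [List.drop_eq_getElem_cons h2]
  have h3 : (a + 1 - a).toNat = 1 := by omega
  rw [h3, List.take_succ_cons, List.take_zero]

-- ===== the diagonal =====
theorem scan_iff :
    ∀ (L : List (Char × Char)), (L.map Prod.snd).Nodup → ∀ (c X : Char),
      (pvUnitScan L c = some X ↔ (X, c) ∈ L) := by
  intro L
  induction L with
  | nil => intro _ c X; simp [pvUnitScan]
  | cons p L ih =>
      intro hnd c X
      have hnd' : (∀ x : Char, (x, p.2) ∉ L) ∧ (List.map Prod.snd L).Nodup := by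
        simpa using hnd
      unfold pvUnitScan
      by_cases hc : c = p.2
      · rw [if_pos hc]
        simp only [Option.some.injEq, List.mem_cons]
        constructor
        · intro h
          left
          rw [Prod.ext_iff]
          exact ⟨h.symm, hc⟩
        · rintro (h | h)
          · exact (congrArg Prod.fst h).symm
          · exact absurd (hc ▸ h) (hnd'.1 X)
      · rw [if_neg hc, ih hnd'.2 c X]
        simp only [List.mem_cons]
        constructor
        · exact Or.inr
        · rintro (h | h)
          · exact absurd (congrArg Prod.snd h) hc
          · exact h

set_option maxRecDepth 8192 in
theorem unitScan_iff (c X : Char) : pvUnitScan pvUnitProd c = some X ↔ (X, c) ∈ pvUnitProd :=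
  scan_iff pvUnitProd (by decide) c X

theorem mem_pvDiag_iff (cs : List Char) (i : Int) (h0 : 0 ≤ i) (h1 : i < (cs.length : Int))
    (X : Char) : X ∈ pvDiag cs i ↔ PvDer X (pvSub cs i i) := by
  have h2 : i.toNat < cs.length := by omega
  have hget : (PySem.List.pyGet? cs i).getD ' ' = cs[i.toNat] := by
    simp [PySem.List.pyGet?, PySem.List.pyIdx?, h0, h1]
  unfold pvDiag
  rw [hget, pvSub_singleton cs h0 h1]
  cases hscan : pvUnitScan pvUnitProd cs[i.toNat] with
  | none =>
      simp only [List.not_mem_nil, false_iff]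
      intro hder
      have := pvDer_singleton hder
      rw [← unitScan_iff] at this
      rw [hscan] at this
      exact absurd this (by simp)
  | some Y =>
      simp only [List.mem_singleton]
      constructor
      · rintro rfl
        exact PvDer.unit ((unitScan_iff _ _).mp hscan)
      · intro hder
        have h3 := (unitScan_iff _ _).mpr (pvDer_singleton hder)
        rw [hscan] at h3
        exact ((Option.some.injEq ..).mp h3.symm)

-- ===== the core CYK step =====
theorem add_iff (cs : List Char) (arr : Int → Int → List Char) (k a : Int)
    (hk : 1 ≤ k) (hka : k ≤ a) (han : a < (cs.length : Int))
    (hInv : PvInv cs arr (k-1)) (X : Char) :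
    X ∈ pvAdd arr k a ↔ PvDer X (pvSub cs (a-k) a) := by
  unfold pvAdd
  simp only [List.mem_flatMap, List.mem_filterMap, PySem.List.mem_pyRange_one]
  constructor
  · rintro ⟨j, ⟨hj1, hj2⟩, p, hp, hifeq⟩
    split at hifeq
    case isFalse => exact absurd hifeq (by simp)
    case isTrue hcond =>
      obtain ⟨hc1, hc2⟩ := hcond
      obtain ⟨hb0, hb1, hb2, hb3, hd1⟩ := (hInv (j-1) (a-k) p.2.1).mp hc1
      obtain ⟨hb0', hb1', hb2', hb3', hd2⟩ := (hInv a j p.2.2).mp hc2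
      have hX : p.1 = X := (Option.some.injEq ..).mp hifeq
      have hpmem : (p.1, p.2.1, p.2.2) ∈ pvProd := by simpa using hp
      have hder := PvDer.bin hpmem hd1 hd2
      rw [pvSub_append cs (by omega) (by omega) (by omega)] at hder
      rw [← hX]
      exact hder
  · intro hder
    have hlen : ((pvSub cs (a-k) a).length : Int) = a + 1 - (a-k) :=
      pvSub_length cs (by omega) (by omega) han
    obtain ⟨Y, Z, st, tt, hp, hY, hZ, hu, hsne, htne⟩ :=
      pvDer_bin_inv hder (by omega)
    have hs1 : st.length ≠ 0 := fun h => hsne (List.eq_nil_of_length_eq_zero h)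
    have ht1 : tt.length ≠ 0 := fun h => htne (List.eq_nil_of_length_eq_zero h)
    have hlen2 : st.length + tt.length = (pvSub cs (a-k) a).length := by
      rw [hu, List.length_append]
    set j : Int := (a - k) + st.length with hjdef
    have hsl : ((st.length : Int)) ≤ k := by omega
    have hseq : st = pvSub cs (a-k) (j-1) := by
      have h1 : st = (pvSub cs (a-k) a).take st.length := by
        rw [hu, List.take_left]
      rw [h1]
      unfold pvSub
      rw [List.take_take]
      congr 1
      omega
    have hteq : tt = pvSub cs j a := by
      have h1 : tt = (pvSub cs (a-k) a).drop st.length := by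
        rw [hu, List.drop_left]
      rw [h1]
      unfold pvSub
      rw [List.drop_take, List.drop_drop]
      congr 1
      · omega
      · congr 1
        omega
    refine ⟨j, ⟨by omega, by omega⟩, (X, Y, Z), hp, ?_⟩
    rw [if_pos ?_]
    constructor
    · exact (hInv (j-1) (a-k) Y).mpr ⟨by omega, by omega, by omega, by omega, hseq ▸ hY⟩
    · exact (hInv a j Z).mpr ⟨by omega, by omega, by omega, by omega, hteq ▸ hZ⟩

theorem level_step (cs : List Char) (arr : Int → Int → List Char) (k : Int) (hk : 1 ≤ k)
    (hInv : PvInv cs arr (k-1)) : PvInv cs (pvKStepF (cs.length : Int) arr k) k := by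
  unfold pvKStepF
  rw [ifold k _ (PySem.List.nodup_pyRange_one k _)]
  intro a b X
  simp only
  by_cases hcell : b = a - k ∧ a ∈ PySem.List.pyRange k (cs.length : Int) 1
  · obtain ⟨hb, hm⟩ := hcell
    subst hb
    obtain ⟨hm1, hm2⟩ := (PySem.List.mem_pyRange_one).mp hm
    rw [if_pos ⟨rfl, hm⟩, List.mem_append]
    have hold : X ∉ arr a (a - k) := fun h => by
      obtain ⟨_, _, _, h3, _⟩ := (hInv a (a - k) X).mp h
      omega
    constructor
    · rintro (h | h)
      · exact absurd h hold
      · have := (add_iff cs arr k a hk hm1 hm2 hInv X).mp h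
        exact ⟨by omega, by omega, hm2, by omega, this⟩
    · rintro ⟨h0, h1, h2, h3, hd⟩
      right
      exact (add_iff cs arr k a hk hm1 hm2 hInv X).mpr hd
  · rw [if_neg hcell, hInv a b X]
    constructor
    · rintro ⟨h0, h1, h2, h3, hd⟩
      exact ⟨h0, h1, h2, by omega, hd⟩
    · rintro ⟨h0, h1, h2, h3, hd⟩
      refine ⟨h0, h1, h2, ?_, hd⟩
      by_cases hgap : a - b ≤ k - 1
      · omega
      · exfalso
        exact hcell ⟨by omega, (PySem.List.mem_pyRange_one).mpr ⟨by omega, h2⟩⟩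

theorem diag_inv (cs : List Char) :
    PvInv cs (fun a b => if a = b ∧ a ∈ PySem.List.pyRange 0 (cs.length : Int) 1
      then ([] : List Char) ++ pvDiag cs a else []) 0 := by
  intro a b X
  simp only
  by_cases hc : a = b ∧ a ∈ PySem.List.pyRange 0 (cs.length : Int) 1
  · obtain ⟨hab, hm⟩ := hc
    subst hab
    obtain ⟨h0, h1⟩ := (PySem.List.mem_pyRange_one).mp hm
    rw [if_pos ⟨rfl, hm⟩, List.nil_append, mem_pvDiag_iff cs a h0 h1 X]
    constructor
    · intro hd; exact ⟨h0, le_refl a, h1, by omega, hd⟩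
    · rintro ⟨_, _, _, _, hd⟩; exact hd
  · rw [if_neg hc]
    simp only [List.not_mem_nil, false_iff]
    rintro ⟨h0, h1, h2, h3, hd⟩
    exact hc ⟨by omega, (PySem.List.mem_pyRange_one).mpr ⟨by omega, by omega⟩⟩

theorem levels_inv (cs : List Char) (arr : Int → Int → List Char) (h0 : PvInv cs arr 0) :
    ∀ (K : Nat), PvInv cs ((PySem.List.pyRange 1 (1 + (K : Int)) 1).foldl
      (pvKStepF (cs.length : Int)) arr) (K : Int) := by
  intro K
  induction K with
  | zero =>
      rw [show (1 + ((0 : Nat) : Int)) = 1 by omega, PySem.List.pyRange_one_eq_nil (le_refl 1)]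
      exact h0
  | succ K ih =>
      have hsplit : PySem.List.pyRange 1 (1 + ((K + 1 : Nat) : Int)) 1
          = PySem.List.pyRange 1 (1 + (K : Int)) 1 ++ [1 + (K : Int)] := by
        rw [show (1 + ((K + 1 : Nat) : Int)) = (1 + (K : Int)) + 1 by push_cast; ring]
        exact PySem.List.pyRange_one_succ_right (by omega)
      rw [hsplit, List.foldl_append, List.foldl_cons, List.foldl_nil]
      have := level_step cs _ (1 + (K : Int)) (by omega)
        (by rw [show (1 + (K : Int)) - 1 = (K : Int) by omega]; exact ih)
      rw [show ((K + 1 : Nat) : Int) = 1 + (K : Int) by push_cast; ring]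
      exact this

theorem validCYK_zero_or_one (regex : String) :
    validCYK regex = 0 ∨ validCYK regex = 1 := by
  unfold validCYK
  by_cases h : 'S' ∈ pvGet (List.foldl (pvKStep (regex.toList.length : Int))
      (List.foldl
        (fun arr i =>
          match pvUnitScan pvUnitProd ((PySem.List.pyGet? regex.toList i).getD ' ') with
          | some X => pvAppend arr i i X
          | none => arr)
        ((PySem.List.pyRange 0 (regex.toList.length : Int) 1).map
          (fun _ => (PySem.List.pyRange 0 (regex.toList.length : Int) 1).map
            (fun _ => ([] : List Char))))
        (PySem.List.pyRange 0 (regex.toList.length : Int) 1))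
      (PySem.List.pyRange 1 (regex.toList.length : Int) 1)) ((regex.toList.length : Int) - 1) 0
  · right; simp only [h, if_true]
  · left; simp only [h, if_false]

theorem tableF_mem_iff (cs : List Char) (hcs : cs ≠ []) :
    'S' ∈ pvTableF cs ((cs.length : Int) - 1) 0 ↔ PvDer 'S' cs := by
  have hn1 : 1 ≤ (cs.length : Int) := by
    have : cs.length ≠ 0 := fun h0 => hcs (List.eq_nil_of_length_eq_zero h0)
    omega
  unfold pvTableF pvArr1F
  rw [loop1_body_eq cs,
    foldl_writers (pvDiag cs) _ (PySem.List.nodup_pyRange_one 0 _) _]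
  have hfin := levels_inv cs _ (diag_inv cs) (((cs.length : Int)) - 1).toNat
  rw [show (1 + (((((cs.length : Int)) - 1).toNat : Nat) : Int))
      = ((cs.length : Int)) by omega] at hfin
  rw [show ((((((cs.length : Int)) - 1).toNat : Nat)) : Int)
      = ((cs.length : Int)) - 1 by omega] at hfin
  have hmem := hfin (((cs.length : Int)) - 1) 0 'S'
  have hsub : pvSub cs 0 (((cs.length : Int)) - 1) = cs := by
    unfold pvSub
    simp only [Int.toNat_zero, List.drop_zero]
    rw [show (((cs.length : Int)) - 1 + 1 - 0).toNat = cs.length by omega]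
    exact List.take_length
  rw [hsub] at hmem
  constructor
  · intro hm
    exact (hmem.mp hm).2.2.2.2
  · intro hder
    exact hmem.mpr ⟨by omega, by omega, by omega, by omega, hder⟩

-- ===== simulation: the list table of port A matches the function table =====
def pvRel (n : Int) (arr : List (List (List Char))) (Arr : Int → Int → List Char) : Prop :=
  (arr.length : Int) = n ∧ (∀ r ∈ arr, (r.length : Int) = n) ∧
  (∀ a b : Int, 0 ≤ a → 0 ≤ b → pvGet arr a b = Arr a b)

theorem foldl_rel {α β γ : Type} (R : α → β → Prop) (f : α → γ → α) (g : β → γ → β) :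
    ∀ (L : List γ) (x : α) (y : β), R x y →
      (∀ (x : α) (y : β) (c : γ), c ∈ L → R x y → R (f x c) (g y c)) →
      R (L.foldl f x) (L.foldl g y) := by
  intro L
  induction L with
  | nil => intro x y h _; exact h
  | cons c L ih =>
      intro x y h hstep
      exact ih _ _ (hstep x y c (List.mem_cons_self ..) h)
        (fun x y c' hc' => hstep x y c' (List.mem_cons_of_mem _ hc'))

theorem pvGet_eq (arr : List (List (List Char))) (a b : Int) :
    pvGet arr a b = ((arr[a.toNat]?.getD [])[b.toNat]?).getD [] := by
  simp [pvGet, List.getD_eq_getElem?_getD]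

theorem pvGet_append (arr : List (List (List Char))) {i j : Int} (hi0 : 0 ≤ i) (hj0 : 0 ≤ j)
    (hiN : i.toNat < arr.length) (hjN : j.toNat < (arr[i.toNat]'hiN).length) (X : Char)
    (a b : Int) (ha : 0 ≤ a) (hb : 0 ≤ b) :
    pvGet (pvAppend arr i j X) a b
    = if a = i ∧ b = j then pvGet arr a b ++ [X] else pvGet arr a b := by
  rw [pvGet_eq, pvGet_eq]
  unfold pvAppend
  by_cases hai : a = i
  · subst hai
    by_cases hbj : b = j
    · subst hbj
      rw [if_pos ⟨rfl, rfl⟩]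
      simp [List.getElem?_modify, List.getElem?_eq_getElem, hiN, hjN]
    · rw [if_neg (fun hcc => hbj hcc.2)]
      have hNb : ¬ (j.toNat = b.toNat) := by omega
      simp [List.getElem?_modify, List.getElem?_eq_getElem, hiN, hNb]
  · rw [if_neg (fun hcc => hai hcc.1)]
    have hNa : ¬ (i.toNat = a.toNat) := by omega
    simp [List.getElem?_modify, hNa]

theorem rel_append {n : Int} {arr : List (List (List Char))} {Arr : Int → Int → List Char}
    (h : pvRel n arr Arr) {i j : Int} (hi0 : 0 ≤ i) (hin : i < n) (hj0 : 0 ≤ j) (hjn : j < n)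
    (X : Char) : pvRel n (pvAppend arr i j X) (pvUpdF Arr i j X) := by
  obtain ⟨hlen, hrows, hget⟩ := h
  have hiN : i.toNat < arr.length := by omega
  have hjN : j.toNat < (arr[i.toNat]'hiN).length := by
    have := hrows _ (List.getElem_mem hiN)
    omega
  refine ⟨?_, ?_, ?_⟩
  · unfold pvAppend; rw [List.length_modify]; exact hlen
  · intro r hr
    unfold pvAppend at hr
    obtain ⟨m, hm, hrm⟩ := List.mem_iff_getElem.mp hr
    rw [List.getElem_modify] at hrm
    split at hrm
    · rw [← hrm, List.length_modify]
      exact hrows _ (List.getElem_mem _)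
    · rw [← hrm]
      exact hrows _ (List.getElem_mem _)
  · intro a b ha hb
    rw [pvGet_append arr hi0 hj0 hiN hjN X a b ha hb]
    unfold pvUpdF
    by_cases hc : a = i ∧ b = j
    · obtain ⟨rfl, rfl⟩ := hc
      rw [if_pos ⟨rfl, rfl⟩, if_pos ⟨rfl, rfl⟩, hget a b ha hb]
    · rw [if_neg hc, if_neg hc, hget a b ha hb]

theorem rel_prodStep {n : Int} {arr : List (List (List Char))} {Arr : Int → Int → List Char}
    (h : pvRel n arr Arr) {k i j : Int} (hk : 1 ≤ k) (hki : k ≤ i) (hin : i < n)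
    (hj1 : i - k + 1 ≤ j) (hj2 : j < i + 1) (p : Char × Char × Char) :
    pvRel n (pvProdStep k i j arr p) (pvProdStepF k i j Arr p) := by
  unfold pvProdStep pvProdStepF
  rw [h.2.2 (j-1) (i-k) (by omega) (by omega), h.2.2 i j (by omega) (by omega)]
  split
  · exact rel_append h (by omega) hin (by omega) (by omega) p.1
  · exact h

theorem rel_jLoop {n : Int} {arr : List (List (List Char))} {Arr : Int → Int → List Char}
    (h : pvRel n arr Arr) {k i : Int} (hk : 1 ≤ k) (hki : k ≤ i) (hin : i < n) :
    pvRel n (pvJLoop k i arr) (pvJLoopF k i Arr) := by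
  unfold pvJLoop pvJLoopF
  refine foldl_rel (pvRel n) _ _ _ arr Arr h ?_
  intro x y j hj hxy
  obtain ⟨hj1, hj2⟩ := (PySem.List.mem_pyRange_one).mp hj
  refine foldl_rel (pvRel n) _ _ _ x y hxy ?_
  intro x y p _ hxy
  exact rel_prodStep hxy hk hki hin hj1 hj2 p

theorem rel_kStep {n : Int} {arr : List (List (List Char))} {Arr : Int → Int → List Char}
    (h : pvRel n arr Arr) {k : Int} (hk : 1 ≤ k) :
    pvRel n (pvKStep n arr k) (pvKStepF n Arr k) := by
  unfold pvKStep pvKStepF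
  refine foldl_rel (pvRel n) _ _ _ arr Arr h ?_
  intro x y i hi hxy
  obtain ⟨hi1, hi2⟩ := (PySem.List.mem_pyRange_one).mp hi
  exact rel_jLoop hxy hk hi1 hi2

theorem rel_init (n : Int) (hn : 0 ≤ n) :
    pvRel n ((PySem.List.pyRange 0 n 1).map
        (fun _ => (PySem.List.pyRange 0 n 1).map (fun _ => ([] : List Char))))
      (fun _ _ => []) := by
  refine ⟨?_, ?_, ?_⟩
  · rw [List.length_map, PySem.List.length_pyRange_one]
    omega
  · intro r hr
    obtain ⟨_, _, hrm⟩ := List.mem_map.mp hr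
    rw [← hrm, List.length_map, PySem.List.length_pyRange_one]
    omega
  · intro a b _ _
    rw [pvGet_eq]
    rw [List.getElem?_map]
    cases hrow : (PySem.List.pyRange 0 n 1)[a.toNat]? with
    | none => simp
    | some v =>
        simp only [Option.map_some, Option.getD_some]
        rw [List.getElem?_map]
        cases (PySem.List.pyRange 0 n 1)[b.toNat]? <;> simp

theorem validCYK_eq_one_iff (regex : String) (h : regex ≠ "") :
    validCYK regex = 1 ↔ PvDer 'S' regex.toList := by
  have hcs : regex.toList ≠ [] := fun hnil => h (String.toList_eq_nil_iff.mp hnil)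
  have hn1 : 1 ≤ (regex.toList.length : Int) := by
    have : regex.toList.length ≠ 0 := fun h0 => hcs (List.eq_nil_of_length_eq_zero h0)
    omega
  unfold validCYK
  simp only
  have hrel1 : pvRel (regex.toList.length : Int)
      ((PySem.List.pyRange 0 (regex.toList.length : Int) 1).foldl
        (fun arr i =>
          match pvUnitScan pvUnitProd ((PySem.List.pyGet? regex.toList i).getD ' ') with
          | some X => pvAppend arr i i X
          | none => arr)
        ((PySem.List.pyRange 0 (regex.toList.length : Int) 1).map
          (fun _ => (PySem.List.pyRange 0 (regex.toList.length : Int) 1).map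
            (fun _ => ([] : List Char)))))
      (pvArr1F regex.toList) := by
    unfold pvArr1F
    refine foldl_rel _ _ _ _ _ _ (rel_init (regex.toList.length : Int) (by omega)) ?_
    intro x y i hi hxy
    obtain ⟨hi1, hi2⟩ := (PySem.List.mem_pyRange_one).mp hi
    cases pvUnitScan pvUnitProd ((PySem.List.pyGet? regex.toList i).getD ' ') with
    | none => exact hxy
    | some X => exact rel_append hxy hi1 hi2 hi1 hi2 X
  have hrel2 : pvRel (regex.toList.length : Int)
      ((PySem.List.pyRange 1 (regex.toList.length : Int) 1).foldl
        (pvKStep (regex.toList.length : Int))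
        ((PySem.List.pyRange 0 (regex.toList.length : Int) 1).foldl
          (fun arr i =>
            match pvUnitScan pvUnitProd ((PySem.List.pyGet? regex.toList i).getD ' ') with
            | some X => pvAppend arr i i X
            | none => arr)
          ((PySem.List.pyRange 0 (regex.toList.length : Int) 1).map
            (fun _ => (PySem.List.pyRange 0 (regex.toList.length : Int) 1).map
              (fun _ => ([] : List Char))))))
      (pvTableF regex.toList) := by
    unfold pvTableF
    refine foldl_rel _ _ _ _ _ _ hrel1 ?_
    intro x y k hk hxy
    obtain ⟨hk1, _⟩ := (PySem.List.mem_pyRange_one).mp hk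
    exact rel_kStep hxy hk1
  rw [hrel2.2.2 ((regex.toList.length : Int) - 1) 0 (by omega) le_rfl]
  by_cases hder : PvDer 'S' regex.toList
  · rw [if_pos ((tableF_mem_iff regex.toList hcs).mpr hder)]
    simp [hder]
  · rw [if_neg (fun hm => hder ((tableF_mem_iff regex.toList hcs).mp hm))]
    simp [hder]

-- ===== VERDICT (by name: the statement is the Claim_ definition above) =====
theorem validCYK_spec : Claim_equal_validCYK := by
  intro regex _ hpre
  unfold Spec_validCYK
  by_cases h : PvDer 'S' regex.toList
  · rw [(validCYK_eq_one_iff regex hpre).mpr h, (alt_eq_one_iff regex).mpr h]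
  · rcases validCYK_zero_or_one regex with h1 | h1
    · rcases alt_zero_or_one regex with h2 | h2
      · rw [h1, h2]
      · exact absurd ((alt_eq_one_iff regex).mp h2) h
    · exact absurd ((validCYK_eq_one_iff regex hpre).mp h1) h
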